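-- pv_equiv track=rewrite | github.com/Jamesprocode/FullPageJazzOMR | datasets/stacking.py | _split_music_tail
-- ===== SOURCE A (Python) =====
-- def _split_music_tail(tokens):
--     """Split a token sequence into (music, tail).
--
--     Tail = trailing lines that contain no music tokens (only spine
--     terminators like *-, !!linebreak:original, and similar).
--     A music line is any line with at least one token starting with a
--     digit (note duration) or '=' (barline).
--     """
--     lines, cur = [], []
--     for tok in tokens:
--         cur.append(tok)
--         if tok == "<n>":
--             lines.append(cur)
--             cur = []
--     if cur:
--         lines.append(cur)
--
--     split = len(lines)
--     for i in range(len(lines) - 1, -1, -1):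
--         content = [t for t in lines[i] if t not in ("<t>", "<n>")]
--         if any(t[0].isdigit() or t.startswith("=") for t in content if t):
--             split = i + 1
--             break
--
--     flat = lambda ls: [t for line in ls for t in line]
--     return flat(lines[:split]), flat(lines[split:])
-- ===== SOURCE B (Python) =====
-- def _split_music_tail(tokens):
--     """Single forward pass: track the position just past the last line that
--     contains a music token; slice the flat token list there."""
--     music_end = None
--     line_has_music = False
--     for i, tok in enumerate(tokens):
--         if tok and (tok[0].isdigit() or tok[0] == "="):
--             line_has_music = True
--         if tok == "<n>":
--             if line_has_music:
--                 music_end = i + 1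
--             line_has_music = False
--     if line_has_music:
--         music_end = len(tokens)
--     if music_end is None:
--         music_end = len(tokens)
--     return tokens[:music_end], tokens[music_end:]
-- ===== Notes on version B (the rewrite author's own statement) =====
-- stated objective: simpler
-- what changed: Replaced A's three-phase build-lines/backward-scan-with-break/re-flatten pipeline by one forward pass over the flat token list that tracks the position just past the last music-bearing line and slices the input there.
import Mathlib
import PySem

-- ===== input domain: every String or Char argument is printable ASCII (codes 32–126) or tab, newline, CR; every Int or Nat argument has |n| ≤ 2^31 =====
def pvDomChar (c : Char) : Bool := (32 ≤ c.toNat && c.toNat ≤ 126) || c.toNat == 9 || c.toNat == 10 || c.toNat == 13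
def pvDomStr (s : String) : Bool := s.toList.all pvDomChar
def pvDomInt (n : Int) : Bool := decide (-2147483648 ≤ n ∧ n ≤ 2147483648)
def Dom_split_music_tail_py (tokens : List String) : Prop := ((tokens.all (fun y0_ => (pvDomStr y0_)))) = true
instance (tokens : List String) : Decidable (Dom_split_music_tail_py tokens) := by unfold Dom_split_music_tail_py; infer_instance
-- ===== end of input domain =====

-- B replaces A's build-lines-then-backward-scan with a single forward pass over the
-- flat token list (objective: simpler decomposition, same O(n) cost).

-- ===== PORT A =====
-- token test: `t[0].isdigit() or t.startswith("=")` under the `if t` guard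
def pvTokA (t : String) : Bool :=
  !(t == "") &&
    ((match PySem.Str.pyGet? t 0 with
      | some c => PySem.Chars.isdigit c
      | none => false) || PySem.Str.startswith t "=")

-- `content = [t for t in line if t not in ("<t>","<n>")]; any(... for t in content if t)`
def pvHasMusicA (line : List String) : Bool :=
  (line.filter (fun t => !(t == "<t>") && !(t == "<n>"))).any pvTokA

-- the first loop: for tok in tokens: cur.append(tok); if tok == "<n>": lines.append(cur); cur = []
def pvBuildA : List String → List (List String) → List String → List (List String)
  | [], lines, cur => if cur == [] then lines else lines ++ [cur]
  | tok :: rest, lines, cur =>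
      let cur' := cur ++ [tok]
      if tok == "<n>" then pvBuildA rest (lines ++ [cur']) [] else pvBuildA rest lines cur'

-- the backward loop `for i in range(len(lines)-1,-1,-1)` with break; argument n+1 scans index n
def pvFindA (lines : List (List String)) : Nat → Nat
  | 0 => lines.length
  | n + 1 => if pvHasMusicA (lines.getD n []) then n + 1 else pvFindA lines n

def split_music_tail_py (tokens : List String) : List String × List String :=
  let lines := pvBuildA tokens [] []
  let split := pvFindA lines lines.length
  ((lines.take split).flatten, (lines.drop split).flatten)

-- ===== PORT B =====
-- `tok and (tok[0].isdigit() or tok[0] == "=")`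
def pvTokB (t : String) : Bool :=
  !(t == "") &&
    (match PySem.Str.pyGet? t 0 with
     | some c => PySem.Chars.isdigit c || c == '='
     | none => false)

-- the single forward loop of Source B; state = (index, line_has_music, music_end)
def pvLoopB : List String → Nat → Bool → Option Nat → Option Nat
  | [], i, has, me => if has then some i else me
  | tok :: rest, i, has, me =>
      let has' := has || pvTokB tok
      if tok == "<n>" then pvLoopB rest (i + 1) false (if has' then some (i + 1) else me)
      else pvLoopB rest (i + 1) has' me

def split_music_tail_py_alt (tokens : List String) : List String × List String :=
  let me := (pvLoopB tokens 0 false none).getD tokens.length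
  (tokens.take me, tokens.drop me)

-- ===== PRECONDITION & SPEC =====
def Spec_split_music_tail_py (tokens : List String) (out : List String × List String) : Prop := out = split_music_tail_py_alt tokens
instance (tokens : List String) (out : List String × List String) : Decidable (Spec_split_music_tail_py tokens out) := by unfold Spec_split_music_tail_py; infer_instance

-- ===== CLAIM (what is proved, stated in full; the proofs are below) =====
def Claim_equal_split_music_tail_py : Prop := ∀ (tokens : List String), Dom_split_music_tail_py tokens → Spec_split_music_tail_py tokens (split_music_tail_py tokens)

-- ===== LEMMAS AND PROOFS =====

-- pure chunking function: the lines A builds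
def chunksC : List String → List String → List (List String)
  | [], cur => if cur == [] then [] else [cur]
  | t :: r, cur => if t == "<n>" then (cur ++ [t]) :: chunksC r [] else chunksC r (cur ++ [t])

theorem build_eq (ts : List String) : ∀ lines cur,
    pvBuildA ts lines cur = lines ++ chunksC ts cur := by
  induction ts with
  | nil => intro lines cur; simp only [pvBuildA, chunksC]; split <;> simp
  | cons t r ih =>
      intro lines cur
      simp only [pvBuildA, chunksC]
      split <;> simp [ih]

theorem flatten_chunks (ts : List String) : ∀ cur, (chunksC ts cur).flatten = cur ++ ts := by
  induction ts with
  | nil => intro cur; simp only [chunksC]; split <;> simp_all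
  | cons t r ih =>
      intro cur
      simp only [chunksC]
      split
      · rename_i ht
        have : t = "<n>" := by simpa using ht
        subst this
        simp [ih]
      · simp [ih]

-- well-formedness of the chunk list: every chunk ends with its "<n>" except a final open one
def GoodLs : List (List String) → Prop
  | [] => True
  | c :: rest => ((∃ c', c = c' ++ ["<n>"] ∧ "<n>" ∉ c') ∧ GoodLs rest) ∨ (rest = [] ∧ "<n>" ∉ c)

theorem good_chunks (ts : List String) : ∀ cur, "<n>" ∉ cur → GoodLs (chunksC ts cur) := by
  induction ts with
  | nil =>
      intro cur h
      simp only [chunksC]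
      split
      · trivial
      · exact Or.inr ⟨rfl, h⟩
  | cons t r ih =>
      intro cur h
      simp only [chunksC]
      split
      · rename_i ht
        have : t = "<n>" := by simpa using ht
        subst this
        exact Or.inl ⟨⟨cur, rfl, h⟩, ih [] (by simp)⟩
      · rename_i ht
        have ht' : t ≠ "<n>" := by simpa using ht
        refine ih (cur ++ [t]) ?_
        simp only [List.mem_append, List.mem_singleton]
        rintro (hc | he)
        · exact h hc
        · exact ht' he.symm

-- chunk-list evaluator matching B's loop
def BE : List (List String) → Nat → Option Nat → Option Nat
  | [], _, me => me
  | c :: rest, i, me => BE rest (i + c.length) (if c.any pvTokB then some (i + c.length) else me)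

theorem pvTokB_nl : pvTokB "<n>" = false := by decide

theorem loopB_no_nl (c : List String) : ∀ (ts : List String) (i : Nat) (has : Bool) (me : Option Nat),
    "<n>" ∉ c →
    pvLoopB (c ++ ts) i has me = pvLoopB ts (i + c.length) (has || c.any pvTokB) me := by
  induction c with
  | nil => intro ts i has me _; simp
  | cons t r ih =>
      intro ts i has me h
      have ht : (t == "<n>") = false := by
        rw [beq_eq_false_iff_ne]
        intro e
        exact h (by simp [e])
      rw [List.cons_append]
      show pvLoopB _ _ _ _ = _
      simp only [pvLoopB, ht, Bool.false_eq_true, if_false]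
      rw [ih ts (i + 1) (has || pvTokB t) me (fun hm => h (List.mem_cons_of_mem _ hm))]
      congr 1
      · simp [List.length_cons]; omega
      · simp [List.any_cons, Bool.or_assoc]

theorem loopB_chunks : ∀ (ls : List (List String)), GoodLs ls → ∀ (i : Nat) (me : Option Nat),
    pvLoopB ls.flatten i false me = BE ls i me := by
  intro ls
  induction ls with
  | nil => intro _ i me; simp [pvLoopB, BE]
  | cons c rest ih =>
      intro hg i me
      rcases hg with ⟨⟨c', rfl, hc'⟩, hrest⟩ | ⟨rfl, hc⟩
      · rw [show ((c' ++ ["<n>"]) :: rest).flatten = c' ++ ("<n>" :: rest.flatten) by simp]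
        rw [loopB_no_nl c' _ i false me hc']
        show pvLoopB _ _ _ _ = _
        simp only [pvLoopB, pvTokB_nl, Bool.or_false, Bool.false_or, beq_self_eq_true, if_true]
        rw [ih hrest]
        simp only [BE, List.any_append, List.any_cons, List.any_nil, pvTokB_nl,
          Bool.or_false, List.length_append, List.length_cons, List.length_nil]
        rw [Nat.add_assoc]
      · simp only [List.flatten_cons, List.flatten_nil, List.append_nil]
        have h1 := loopB_no_nl c [] i false me hc
        rw [List.append_nil] at h1
        rw [h1]
        simp [pvLoopB, BE]

-- last music line: lastM l n scans indices below n from the top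
def lastM (l : List (List String)) : Nat → Option Nat
  | 0 => none
  | n + 1 => if pvHasMusicA (l.getD n []) then some (n + 1) else lastM l n

theorem findA_eq (l : List (List String)) : ∀ n, pvFindA l n = (lastM l n).getD l.length := by
  intro n
  induction n with
  | zero => simp [pvFindA, lastM]
  | succ n ih => simp only [pvFindA, lastM]; split <;> simp [ih]

theorem lastM_le (l : List (List String)) : ∀ n s, lastM l n = some s → s ≤ n := by
  intro n
  induction n with
  | zero => simp [lastM]
  | succ n ih =>
      intro s h
      simp only [lastM] at h
      split at h
      · cases h; omega
      · have := ih s h; omega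

theorem lastM_append (l : List (List String)) (c : List String) :
    ∀ n, n ≤ l.length → lastM (l ++ [c]) n = lastM l n := by
  intro n
  induction n with
  | zero => simp [lastM]
  | succ n ih =>
      intro h
      have hn : n < l.length := by omega
      simp only [lastM]
      rw [List.getD_eq_getElem?_getD, List.getD_eq_getElem?_getD,
          List.getElem?_append_left hn, ih (by omega)]

theorem BE_snoc (c : List String) : ∀ (ls : List (List String)) (i : Nat) (me : Option Nat),
    BE (ls ++ [c]) i me =
      if c.any pvTokB then some (i + ls.flatten.length + c.length) else BE ls i me := by
  intro ls
  induction ls with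
  | nil => intro i me; simp [BE]
  | cons d rest ih =>
      intro i me
      simp only [List.cons_append, BE]
      rw [ih]
      simp only [List.flatten_cons, List.length_append]
      split
      · congr 1; omega
      · rfl

-- predicate bridge: A's filtered line test equals B's per-token test
theorem startswith_eq_head (t : String) :
    PySem.Str.startswith t "=" = (t.toList[0]? == some '=') := by
  have he : "=".toList = ['='] := by decide
  have h : PySem.Str.startswith t "=" = PySem.Chars.startswith t.toList ['='] := by
    simp [he]
  rw [h]
  cases hl : t.toList with
  | nil => decide
  | cons c cs =>
      by_cases hc : c = '='
      · subst hc
        have h1 : PySem.Chars.startswith ('=' :: cs) ['='] = true := by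
          rw [PySem.Chars.startswith_iff]
          exact ⟨cs, rfl⟩
        simp [h1]
      · have h2 : PySem.Chars.startswith (c :: cs) ['='] = false := by
          rw [← Bool.not_eq_true, PySem.Chars.startswith_iff]
          rintro ⟨l, hl2⟩
          exact hc (by injection hl2 with a _; exact a.symm)
        simp [h2, hc]

theorem tok_eq (t : String) :
    ((!(t == "<t>") && !(t == "<n>")) && pvTokA t) = pvTokB t := by
  by_cases h1 : t = "<t>"
  · subst h1; decide
  by_cases h2 : t = "<n>"
  · subst h2; decide
  by_cases h0 : t = ""
  · subst h0; decide
  have hget : PySem.Str.pyGet? t 0 = t.toList[0]? := by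
    simp [PySem.Chars.pyGet?_eq_listPyGet?, PySem.List.pyGet?_zero]
  cases hl : t.toList with
  | nil =>
      exact absurd (by rw [← String.toList_inj, hl]; rfl) h0
  | cons c cs =>
      simp only [pvTokA, pvTokB, hget, hl, startswith_eq_head,
        List.getElem?_cons_zero]
      simp
      cases PySem.Chars.isdigit c <;> cases hcc : (c == '=') <;> simp_all

theorem hasMusic_eq (c : List String) : pvHasMusicA c = c.any pvTokB := by
  unfold pvHasMusicA
  rw [List.any_filter]
  congr 1
  funext t
  exact tok_eq t

theorem BE_lastM : ∀ (ls : List (List String)),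
    BE ls 0 none = (lastM ls ls.length).map (fun s => ((ls.take s).flatten).length) := by
  intro ls
  induction ls using List.reverseRecOn with
  | nil => simp [BE, lastM]
  | append_singleton ls c ih =>
      rw [BE_snoc]
      have hlen : (ls ++ [c]).length = ls.length + 1 := by simp
      rw [hlen]
      simp only [lastM]
      have hget : (ls ++ [c]).getD ls.length [] = c := by
        rw [List.getD_eq_getElem?_getD]
        simp
      rw [hget, hasMusic_eq]
      by_cases hm : c.any pvTokB = true
      · simp [hm]
      · simp only [Bool.not_eq_true] at hm
        rw [hm]
        simp only [Bool.false_eq_true, if_false, ih, lastM_append ls c ls.length le_rfl]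
        cases hL : lastM ls ls.length with
        | none => simp
        | some s =>
            have hs : s ≤ ls.length := lastM_le ls ls.length s hL
            simp only [Option.map_some]
            congr 1
            rw [List.take_append_of_le_length hs]

-- ===== VERDICT (by name: the statement is the Claim_ definition above) =====
theorem split_music_tail_py_spec : Claim_equal_split_music_tail_py := by
  intro tokens _
  unfold Spec_split_music_tail_py split_music_tail_py split_music_tail_py_alt
  rw [build_eq]
  simp only [List.nil_append]
  set ls := chunksC tokens [] with hls
  have hflat : ls.flatten = tokens := by rw [hls, flatten_chunks]; simp
  have hgood : GoodLs ls := good_chunks tokens [] (by simp)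
  have hB : pvLoopB tokens 0 false none =
      (lastM ls ls.length).map (fun s => ((ls.take s).flatten).length) := by
    rw [← hflat, loopB_chunks ls hgood, BE_lastM]
  rw [findA_eq, hB]
  cases hL : lastM ls ls.length with
  | none =>
      simp only [Option.map_none, Option.getD_none]
      rw [List.take_length, List.drop_length, ← hflat]
      simp
  | some s =>
      simp only [Option.map_some, Option.getD_some]
      have key : (ls.take s).flatten ++ (ls.drop s).flatten = tokens := by
        rw [← List.flatten_append, List.take_append_drop, hflat]
      rw [← key, List.take_left, List.drop_left]
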